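-- pv_equiv track=rewrite | github.com/jasonsutter87/P.F.M.-Pure-Fucking-Magic- | pfm/export.py | parse_turns
-- ===== SOURCE A (Python) =====
-- def parse_turns(text: str) -> list[tuple[str, str]]:
--     """Parse a chain string into (role, content) turn pairs.
--
--     Chrome extension writes chains as:
--         User: ...\n\nAssistant: ...
--
--     We split on double-newline boundaries and detect User:/Assistant: prefixes.
--     """
--     turns: list[tuple[str, str]] = []
--     if not text or not text.strip():
--         return turns
--
--     blocks = text.split("\n\n")
--     current_role: str | None = None
--     current_lines: list[str] = []
--
--     for block in blocks:
--         stripped = block.strip()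
--         if not stripped:
--             continue
--
--         # Detect role prefix
--         if stripped.startswith("User:"):
--             # Flush previous
--             if current_role is not None:
--                 turns.append((current_role, "\n\n".join(current_lines).strip()))
--             current_role = "user"
--             current_lines = [stripped[len("User:"):].strip()]
--         elif stripped.startswith("Assistant:"):
--             if current_role is not None:
--                 turns.append((current_role, "\n\n".join(current_lines).strip()))
--             current_role = "assistant"
--             current_lines = [stripped[len("Assistant:"):].strip()]
--         elif stripped.startswith("Agent:"):
--             if current_role is not None:
--                 turns.append((current_role, "\n\n".join(current_lines).strip()))
--             current_role = "assistant"
--             current_lines = [stripped[len("Agent:"):].strip()]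
--         else:
--             # Continuation of current block
--             if current_role is not None:
--                 current_lines.append(stripped)
--             else:
--                 # No role prefix yet — treat as assistant content
--                 current_role = "assistant"
--                 current_lines = [stripped]
--
--     # Flush last turn
--     if current_role is not None:
--         turns.append((current_role, "\n\n".join(current_lines).strip()))
--
--     return turns
-- ===== SOURCE B (Python) =====
-- _PREFIXES = (("User:", "user"), ("Assistant:", "assistant"), ("Agent:", "assistant"))
--
--
-- def _match_role(s):
--     """Return (role, stripped text after the prefix) if s opens a new turn, else None."""
--     for prefix, role in _PREFIXES:
--         if s.startswith(prefix):
--             return role, s[len(prefix):].strip()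
--     return None
--
--
-- def _split_continuations(blocks):
--     """Split blocks into (leading run of continuation blocks, the rest)."""
--     for i, b in enumerate(blocks):
--         if _match_role(b) is not None:
--             return blocks[:i], blocks[i:]
--     return blocks, []
--
--
-- def parse_turns(text: str) -> list[tuple[str, str]]:
--     if not text or not text.strip():
--         return []
--     # Normalising pass: stripped, non-empty blocks only.
--     blocks = [s for b in text.split("\n\n") if (s := b.strip())]
--     # Turn-at-a-time loop: each iteration consumes one whole turn (its opening
--     # block plus the run of continuation blocks that follow it).
--     turns = []
--     while blocks:
--         head, rest = blocks[0], blocks[1:]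
--         m = _match_role(head)
--         role, first = m if m is not None else ("assistant", head)
--         body, blocks = _split_continuations(rest)
--         turns.append((role, "\n\n".join([first] + body).strip()))
--     return turns
-- ===== Notes on version B (the rewrite author's own statement) =====
-- stated objective: alternative
-- what changed: Replaces A's per-block loop with an open (current_role, current_lines) accumulator and four duplicated flush sites by a normalising filter pass (stripped non-empty blocks) followed by a turn-at-a-time loop that consumes one whole turn per iteration (its opening block plus the run of continuation blocks split off by a span helper) and emits it immediately.
import Mathlib
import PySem

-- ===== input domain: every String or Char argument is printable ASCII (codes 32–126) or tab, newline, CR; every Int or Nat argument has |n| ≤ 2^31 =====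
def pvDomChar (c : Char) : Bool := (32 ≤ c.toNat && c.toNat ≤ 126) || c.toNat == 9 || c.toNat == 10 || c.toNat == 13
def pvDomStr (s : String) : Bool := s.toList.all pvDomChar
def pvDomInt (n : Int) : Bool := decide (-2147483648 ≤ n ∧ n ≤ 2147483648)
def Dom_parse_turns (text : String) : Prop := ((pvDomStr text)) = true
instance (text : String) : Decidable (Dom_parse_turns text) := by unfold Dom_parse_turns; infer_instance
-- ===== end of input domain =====

-- B replaces A's per-block loop with an open (current_role, current_lines) accumulator and
-- four flush sites by a normalising filter pass followed by a turn-at-a-time loop that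
-- consumes one whole turn (opening block + its continuation run) per iteration.

-- ===== PORT A =====
-- "\n\n".join(cl).strip()
def pvJoinStripA (cl : List (List Char)) : String :=
  String.ofList (PySem.Chars.strip (PySem.Chars.join ['\n', '\n'] cl))

-- "if current_role is not None: turns.append((current_role, "\n\n".join(current_lines).strip()))"
def pvFlushA (turns : List (String × String)) (cr : Option String) (cl : List (List Char)) :
    List (String × String) :=
  match cr with
  | some r => turns ++ [(r, pvJoinStripA cl)]
  | none => turns

-- one iteration of A's for-loop; state = (turns, current_role, current_lines)
def pvStepA (st : List (String × String) × Option String × List (List Char)) (block : List Char) :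
    List (String × String) × Option String × List (List Char) :=
  let stripped := PySem.Chars.strip block
  if stripped = [] then st
  else if PySem.Chars.startswith stripped ("User:".toList) then
    (pvFlushA st.1 st.2.1 st.2.2, some "user",
      [PySem.Chars.strip (PySem.Chars.slice stripped (some 5) none)])
  else if PySem.Chars.startswith stripped ("Assistant:".toList) then
    (pvFlushA st.1 st.2.1 st.2.2, some "assistant",
      [PySem.Chars.strip (PySem.Chars.slice stripped (some 10) none)])
  else if PySem.Chars.startswith stripped ("Agent:".toList) then
    (pvFlushA st.1 st.2.1 st.2.2, some "assistant",
      [PySem.Chars.strip (PySem.Chars.slice stripped (some 6) none)])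
  else
    match st.2.1 with
    | some _ => (st.1, st.2.1, st.2.2 ++ [stripped])
    | none => (st.1, some "assistant", [stripped])

def parse_turns (text : String) : List (String × String) :=
  if text.toList = [] then []
  else if PySem.Chars.strip text.toList = [] then []
  else
    let blocks := PySem.Chars.splitOn text.toList ['\n', '\n']
    let st := blocks.foldl pvStepA ([], none, [])
    pvFlushA st.1 st.2.1 st.2.2

-- ===== PORT B =====
-- _match_role: walk the _PREFIXES table, first match wins
def pvMatchRoleAux (table : List (List Char × String)) (s : List Char) :
    Option (String × List Char) :=
  match table with
  | [] => none
  | (p, r) :: rest =>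
    if PySem.Chars.startswith s p then
      some (r, PySem.Chars.strip (PySem.Chars.slice s (some (p.length : Int)) none))
    else pvMatchRoleAux rest s

def pvMatchRole (s : List Char) : Option (String × List Char) :=
  pvMatchRoleAux [("User:".toList, "user"), ("Assistant:".toList, "assistant"),
                  ("Agent:".toList, "assistant")] s

-- _split_continuations: blocks[:i], blocks[i:] at the first role-opening block
def pvSplitCont (blocks : List (List Char)) : List (List Char) × List (List Char) :=
  match blocks with
  | [] => ([], [])
  | b :: bs =>
    if (pvMatchRole b).isSome then ([], b :: bs)
    else
      let (t, d) := pvSplitCont bs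
      (b :: t, d)

-- needed by pvLoopB's termination proof
lemma pvSplitCont_len (bs : List (List Char)) : (pvSplitCont bs).2.length ≤ bs.length := by
  induction bs with
  | nil => simp [pvSplitCont]
  | cons b bs ih =>
    simp only [pvSplitCont]
    split
    · simp
    · simpa using Nat.le_succ_of_le ih

-- the "while blocks:" loop: one whole turn consumed per iteration
def pvLoopB (blocks : List (List Char)) : List (String × String) :=
  match blocks with
  | [] => []
  | head :: rest =>
    let rf := match pvMatchRole head with
      | some m => m
      | none => ("assistant", head)
    let bd := pvSplitCont rest
    (rf.1, String.ofList (PySem.Chars.strip (PySem.Chars.join ['\n', '\n'] (rf.2 :: bd.1))))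
      :: pvLoopB bd.2
termination_by blocks.length
decreasing_by
  exact Nat.lt_succ_of_le (pvSplitCont_len rest)

def parse_turns_alt (text : String) : List (String × String) :=
  if text.toList = [] then []
  else if PySem.Chars.strip text.toList = [] then []
  else
    pvLoopB ((PySem.Chars.splitOn text.toList ['\n', '\n']).filterMap
      (fun b => let s := PySem.Chars.strip b; if s = [] then none else some s))

-- ===== PRECONDITION & SPEC =====
def Spec_parse_turns (text : String) (out : List (String × String)) : Prop := out = parse_turns_alt text
instance (text : String) (out : List (String × String)) : Decidable (Spec_parse_turns text out) := by unfold Spec_parse_turns; infer_instance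

-- ===== CLAIM (what is proved, stated in full; the proofs are below) =====
def Claim_equal_parse_turns : Prop := ∀ (text : String), Dom_parse_turns text → Spec_parse_turns text (parse_turns text)

-- ===== LEMMAS AND PROOFS =====

-- A's step on an already-stripped block (the stripped ≠ [] part of pvStepA)
def pvStepA' (st : List (String × String) × Option String × List (List Char)) (s : List Char) :
    List (String × String) × Option String × List (List Char) :=
  if PySem.Chars.startswith s ("User:".toList) then
    (pvFlushA st.1 st.2.1 st.2.2, some "user",
      [PySem.Chars.strip (PySem.Chars.slice s (some 5) none)])
  else if PySem.Chars.startswith s ("Assistant:".toList) then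
    (pvFlushA st.1 st.2.1 st.2.2, some "assistant",
      [PySem.Chars.strip (PySem.Chars.slice s (some 10) none)])
  else if PySem.Chars.startswith s ("Agent:".toList) then
    (pvFlushA st.1 st.2.1 st.2.2, some "assistant",
      [PySem.Chars.strip (PySem.Chars.slice s (some 6) none)])
  else
    match st.2.1 with
    | some _ => (st.1, st.2.1, st.2.2 ++ [s])
    | none => (st.1, some "assistant", [s])

lemma pvStepA_eq (st : List (String × String) × Option String × List (List Char))
    (b : List Char) :
    pvStepA st b = if PySem.Chars.strip b = [] then st else pvStepA' st (PySem.Chars.strip b) := by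
  simp only [pvStepA, pvStepA']

-- pvStepA' through pvMatchRole
lemma pvStepA'_match (turns : List (String × String)) (cr : Option String)
    (cl : List (List Char)) (s : List Char) :
    pvStepA' (turns, cr, cl) s =
      match pvMatchRole s with
      | some (r', c') => (pvFlushA turns cr cl, some r', [c'])
      | none =>
        match cr with
        | some _ => (turns, cr, cl ++ [s])
        | none => (turns, some "assistant", [s]) := by
  simp only [pvStepA', pvMatchRole, pvMatchRoleAux]
  split_ifs <;> rfl

-- A's fold over all blocks = A's stripped fold over the filtered stripped blocks
lemma pvFold_filter (blocks : List (List Char)) :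
    ∀ st, blocks.foldl pvStepA st =
      (blocks.filterMap
        (fun b => let s := PySem.Chars.strip b; if s = [] then none else some s)).foldl
        pvStepA' st := by
  induction blocks with
  | nil => intro st; rfl
  | cons b bs ih =>
    intro st
    simp only [List.foldl_cons, List.filterMap_cons]
    by_cases h : PySem.Chars.strip b = []
    · simp only [h, pvStepA_eq]
      exact ih st
    · simp only [List.foldl_cons, pvStepA_eq, if_neg h]
      exact ih _

lemma pvLoopB_nil : pvLoopB [] = [] := by
  rw [pvLoopB.eq_def]

lemma pvLoopB_cons (b : List Char) (bs : List (List Char)) :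
    pvLoopB (b :: bs) =
      ((match pvMatchRole b with | some m => m | none => ("assistant", b)).1,
        String.ofList (PySem.Chars.strip (PySem.Chars.join ['\n', '\n']
          ((match pvMatchRole b with | some m => m | none => ("assistant", b)).2
            :: (pvSplitCont bs).1))))
        :: pvLoopB (pvSplitCont bs).2 := by
  rw [pvLoopB.eq_def]

-- the final flush, as A's epilogue applies it to the loop state
def pvFinishA (st : List (String × String) × Option String × List (List Char)) :
    List (String × String) :=
  pvFlushA st.1 st.2.1 st.2.2

-- main invariant: folding A's stripped step from an open segment (r, cl) and then flushing
-- produces the already-flushed turns, then the turn closed by the continuation run, then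
-- B's turn-at-a-time parse of the rest
lemma pvMain (bs : List (List Char)) :
    ∀ (turns : List (String × String)) (r : String) (cl : List (List Char)),
      pvFinishA (bs.foldl pvStepA' (turns, some r, cl)) =
        turns ++ (r, pvJoinStripA (cl ++ (pvSplitCont bs).1)) :: pvLoopB (pvSplitCont bs).2 := by
  induction bs with
  | nil =>
    intro turns r cl
    simp [pvFinishA, pvFlushA, pvSplitCont, pvLoopB_nil]
  | cons b bs ih =>
    intro turns r cl
    simp only [List.foldl_cons, pvStepA'_match]
    cases h : pvMatchRole b with
    | none =>
      rw [ih]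
      simp [pvSplitCont, h]
    | some m =>
      obtain ⟨r', c'⟩ := m
      rw [ih]
      simp [pvSplitCont, h, pvFlushA, pvJoinStripA, pvLoopB_cons]

-- ===== VERDICT (by name: the statement is the Claim_ definition above) =====
theorem parse_turns_spec : Claim_equal_parse_turns := by
  intro text _
  unfold Spec_parse_turns parse_turns parse_turns_alt
  split_ifs with h1 h2
  · rfl
  · rfl
  · show pvFinishA ((PySem.Chars.splitOn text.toList ['\n', '\n']).foldl pvStepA
        ([], none, [])) = _
    rw [pvFold_filter]
    generalize (PySem.Chars.splitOn text.toList ['\n', '\n']).filterMap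
      (fun b => let s := PySem.Chars.strip b; if s = [] then none else some s) = fbs
    cases fbs with
    | nil => simp [pvFinishA, pvFlushA, pvLoopB_nil]
    | cons b bs =>
      simp only [List.foldl_cons, pvStepA'_match]
      cases h : pvMatchRole b with
      | none =>
        rw [pvMain bs [] "assistant" [b]]
        simp [h, pvJoinStripA, pvLoopB_cons]
      | some m =>
        obtain ⟨r', c'⟩ := m
        simp only [pvFlushA]
        rw [pvMain bs [] r' [c']]
        simp [h, pvJoinStripA, pvLoopB_cons]
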